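-- pv_equiv track=rewrite | github.com/psainaveen12/NewsBlogTrafficGen | scripts/browser_matrix.py | is_crash_like_error
-- ===== SOURCE A (Python) =====
-- def is_crash_like_error(message: str) -> bool:
--     lowered = message.lower()
--     markers = (
--         "page crashed",
--         "target crashed",
--         "target closed",
--         "has been closed",
--         "browser has been closed",
--         "connection closed",
--         "session closed",
--     )
--     return any(marker in lowered for marker in markers)
-- ===== SOURCE B (Python) =====
-- def is_crash_like_error(message: str) -> bool:
--     # Anchor-based scan: every marker ends in the anchor word "crashed" or "closed"
--     # ("browser has been closed" is subsumed by "has been closed").  Walk the text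
--     # once; at each position where an anchor starts, check that the text before it
--     # ends with one of the admissible prefixes for that anchor.
--     text = message.lower()
--     for i in range(len(text)):
--         if text.startswith("crashed", i):
--             if text.endswith(("page ", "target "), 0, i):
--                 return True
--         elif text.startswith("closed", i):
--             if text.endswith(("target ", "has been ", "connection ", "session "), 0, i):
--                 return True
--     return False
-- ===== Notes on version B (the rewrite author's own statement) =====
-- stated objective: alternative
-- what changed: Instead of testing each of the seven whole markers for membership in the lowered message, B makes one position-by-position scan that looks only for the two shared anchor words and, at each anchor position, checks that the preceding text ends with one of the admissible marker prefixes; the redundant marker subsumed by a shorter one disappears.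
import Mathlib
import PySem

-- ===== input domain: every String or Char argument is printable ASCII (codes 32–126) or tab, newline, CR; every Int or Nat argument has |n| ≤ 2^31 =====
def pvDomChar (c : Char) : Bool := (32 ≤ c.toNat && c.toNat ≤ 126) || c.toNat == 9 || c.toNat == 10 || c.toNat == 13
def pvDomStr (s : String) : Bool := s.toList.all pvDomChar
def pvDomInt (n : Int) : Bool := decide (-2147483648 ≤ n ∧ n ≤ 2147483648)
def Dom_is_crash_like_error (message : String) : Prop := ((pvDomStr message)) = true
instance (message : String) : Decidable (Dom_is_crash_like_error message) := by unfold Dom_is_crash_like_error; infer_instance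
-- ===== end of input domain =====

-- B replaces A's seven whole-marker substring scans by a single anchored left-to-right scan:
-- every marker ends in the anchor word "crashed" or "closed", so B looks for an anchor and
-- checks that the text before it ends with an admissible prefix; objective: alternative.

-- ===== PORT A =====
-- the tuple 'markers' of A, in A's order
def pvMarkers : List String :=
  ["page crashed", "target crashed", "target closed", "has been closed",
   "browser has been closed", "connection closed", "session closed"]

def is_crash_like_error (message : String) : Bool :=
  let lowered := PySem.Str.lower message
  pvMarkers.any (fun marker => PySem.Str.isIn marker lowered)

-- ===== PORT B =====
def pvCra : List Char := "crashed".toList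
def pvClo : List Char := "closed".toList
-- the admissible prefixes before each anchor ("browser has been closed" is subsumed
-- by "has been closed", so it needs no prefix of its own)
def pvCrashPres : List (List Char) := ["page ".toList, "target ".toList]
def pvClosePres : List (List Char) :=
  ["target ".toList, "has been ".toList, "connection ".toList, "session ".toList]

-- text[:i].endswith(tuple): rp is the processed prefix, reversed
def pvEndsWithOne (rp : List Char) (ws : List (List Char)) : Bool :=
  ws.any (fun w => w.reverse.isPrefixOf rp)

-- the loop 'for i in range(len(text))', carrying the processed prefix reversed
def pvScan (rp : List Char) : List Char → Bool
  | [] => false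
  | c :: t =>
    if pvCra.isPrefixOf (c :: t) then
      if pvEndsWithOne rp pvCrashPres then true else pvScan (c :: rp) t
    else if pvClo.isPrefixOf (c :: t) then
      if pvEndsWithOne rp pvClosePres then true else pvScan (c :: rp) t
    else pvScan (c :: rp) t

def is_crash_like_error_alt (message : String) : Bool :=
  pvScan [] (PySem.Str.lower message).toList

-- ===== PRECONDITION & SPEC =====
def Spec_is_crash_like_error (message : String) (out : Bool) : Prop := out = is_crash_like_error_alt message
instance (message : String) (out : Bool) : Decidable (Spec_is_crash_like_error message out) := by unfold Spec_is_crash_like_error; infer_instance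

-- ===== CLAIM (what is proved, stated in full; the proofs are below) =====
def Claim_equal_is_crash_like_error : Prop := ∀ (message : String), Dom_is_crash_like_error message → Spec_is_crash_like_error message (is_crash_like_error message)

-- ===== LEMMAS AND PROOFS =====

-- the two anchors cannot both start at the same position
theorem pv_not_both (x : List Char) (h1 : pvCra <+: x) (h2 : pvClo <+: x) : False := by
  obtain ⟨u, rfl⟩ := h1
  simp [pvCra, pvClo, List.cons_prefix_cons] at h2

-- the condition the loop body tests at one position
def pvHere (rp b : List Char) : Prop :=
  (pvCra <+: b ∧ pvEndsWithOne rp pvCrashPres = true) ∨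
  (pvClo <+: b ∧ pvEndsWithOne rp pvClosePres = true)

-- characterisation of the scan: some split of rest puts an anchor at the split point
theorem pvScan_iff (rest : List Char) : ∀ rp, pvScan rp rest = true ↔
    ∃ a b, rest = a ++ b ∧ pvHere (a.reverse ++ rp) b := by
  induction rest with
  | nil =>
      intro rp
      simp only [pvScan]
      constructor
      · intro h; cases h
      · rintro ⟨a, b, hab, h⟩
        rcases List.append_eq_nil_iff.mp hab.symm with ⟨rfl, rfl⟩
        rcases h with ⟨h, _⟩ | ⟨h, _⟩ <;> simp [pvCra, pvClo] at h
  | cons c t ih =>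
      intro rp
      have step : pvScan rp (c :: t) = true ↔ pvHere rp (c :: t) ∨ pvScan (c :: rp) t = true := by
        simp only [pvScan, pvHere]
        by_cases h1 : pvCra <+: (c :: t)
        · have h2 : ¬ pvClo <+: (c :: t) := fun h2 => pv_not_both _ h1 h2
          by_cases he : pvEndsWithOne rp pvCrashPres = true <;>
            simp [List.isPrefixOf_iff_prefix, h1, h2, he]
        · by_cases h2 : pvClo <+: (c :: t) <;>
            by_cases he : pvEndsWithOne rp pvClosePres = true <;>
              simp [List.isPrefixOf_iff_prefix, h1, h2, he]
      rw [step, ih (c :: rp)]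
      constructor
      · rintro (h | ⟨a, b, hab, h⟩)
        · exact ⟨[], c :: t, rfl, by simpa using h⟩
        · exact ⟨c :: a, b, by simp [hab], by simpa using h⟩
      · rintro ⟨a, b, hab, h⟩
        cases a with
        | nil => subst hab; exact Or.inl (by simpa using h)
        | cons c' a' =>
            obtain ⟨rfl, rfl⟩ : c = c' ∧ t = a' ++ b := by
              simpa using hab
            exact Or.inr ⟨a', b, rfl, by simpa using h⟩

-- "the text before the anchor ends with w" = "w ++ anchor occurs as an infix"
theorem pv_pre_anchor_iff (l w anc : List Char) :
    (∃ a b, l = a ++ b ∧ anc <+: b ∧ w <:+ a) ↔ (w ++ anc) <:+: l := by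
  constructor
  · rintro ⟨a, b, rfl, ⟨u, rfl⟩, ⟨s, rfl⟩⟩
    exact ⟨s, u, by simp⟩
  · rintro ⟨s, u, rfl⟩
    exact ⟨s ++ w, anc ++ u, by simp, ⟨u, rfl⟩, ⟨s, rfl⟩⟩

-- the list-level equivalence of the two programs
theorem pv_main (l : List Char) :
    pvMarkers.any (fun m => decide (m.toList <:+: l)) = pvScan [] l := by
  rw [Bool.eq_iff_iff, pvScan_iff]
  simp only [List.any_eq_true, decide_eq_true_eq]
  constructor
  · -- each marker is (prefix ++ anchor); "browser has been closed" reduces to "has been closed"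
    rintro ⟨m, hm, hinf⟩
    simp only [pvMarkers, List.mem_cons, List.not_mem_nil, or_false] at hm
    have key : ∀ w anc pres, w ∈ pres → (w ++ anc) <:+: l →
        ((anc = pvCra ∧ pres = pvCrashPres) ∨ (anc = pvClo ∧ pres = pvClosePres)) →
        ∃ a b, l = a ++ b ∧ pvHere (a.reverse ++ []) b := by
      rintro w anc pres hw hi hcase
      obtain ⟨a, b, hab, hpre, hsuf⟩ := (pv_pre_anchor_iff l w anc).mpr hi
      refine ⟨a, b, hab, ?_⟩
      have hend : pvEndsWithOne (a.reverse ++ []) pres = true := by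
        simp only [pvEndsWithOne, List.any_eq_true, List.isPrefixOf_iff_prefix]
        exact ⟨w, hw, by simpa [List.reverse_prefix] using hsuf⟩
      rcases hcase with ⟨rfl, rfl⟩ | ⟨rfl, rfl⟩
      · exact Or.inl ⟨hpre, hend⟩
      · exact Or.inr ⟨hpre, hend⟩
    rcases hm with rfl | rfl | rfl | rfl | rfl | rfl | rfl
    · exact key "page ".toList pvCra pvCrashPres (by simp [pvCrashPres]) (by exact hinf) (by left; exact ⟨rfl, rfl⟩)
    · exact key "target ".toList pvCra pvCrashPres (by simp [pvCrashPres]) (by exact hinf) (by left; exact ⟨rfl, rfl⟩)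
    · exact key "target ".toList pvClo pvClosePres (by simp [pvClosePres]) (by exact hinf) (by right; exact ⟨rfl, rfl⟩)
    · exact key "has been ".toList pvClo pvClosePres (by simp [pvClosePres]) (by exact hinf) (by right; exact ⟨rfl, rfl⟩)
    · -- "browser has been closed" contains "has been closed"
      have hsub : ("has been ".toList ++ pvClo) <:+: l := by
        refine List.IsInfix.trans ?_ (by exact hinf)
        exact ⟨"browser ".toList, [], by decide⟩
      exact key "has been ".toList pvClo pvClosePres (by simp [pvClosePres]) hsub (by right; exact ⟨rfl, rfl⟩)
    · exact key "connection ".toList pvClo pvClosePres (by simp [pvClosePres]) (by exact hinf) (by right; exact ⟨rfl, rfl⟩)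
    · exact key "session ".toList pvClo pvClosePres (by simp [pvClosePres]) (by exact hinf) (by right; exact ⟨rfl, rfl⟩)
  · rintro ⟨a, b, hab, h⟩
    rcases h with ⟨hpre, hend⟩ | ⟨hpre, hend⟩ <;>
      · simp only [pvEndsWithOne, List.any_eq_true, List.isPrefixOf_iff_prefix] at hend
        obtain ⟨w, hw, hrev⟩ := hend
        have hsuf : w <:+ a := by
          rw [← List.reverse_prefix]; simpa using hrev
        have hinf : (w ++ _) <:+: l := (pv_pre_anchor_iff l w _).mp ⟨a, b, hab, hpre, hsuf⟩
        first
        | (simp only [pvCrashPres, List.mem_cons, List.not_mem_nil, or_false] at hw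
           rcases hw with rfl | rfl
           · exact ⟨"page crashed", by simp [pvMarkers], by simpa [pvCra] using hinf⟩
           · exact ⟨"target crashed", by simp [pvMarkers], by simpa [pvCra] using hinf⟩)
        | (simp only [pvClosePres, List.mem_cons, List.not_mem_nil, or_false] at hw
           rcases hw with rfl | rfl | rfl | rfl
           · exact ⟨"target closed", by simp [pvMarkers], by simpa [pvClo] using hinf⟩
           · exact ⟨"has been closed", by simp [pvMarkers], by simpa [pvClo] using hinf⟩
           · exact ⟨"connection closed", by simp [pvMarkers], by simpa [pvClo] using hinf⟩
           · exact ⟨"session closed", by simp [pvMarkers], by simpa [pvClo] using hinf⟩)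

-- ===== VERDICT (by name: the statement is the Claim_ definition above) =====
theorem is_crash_like_error_spec : Claim_equal_is_crash_like_error := by
  intro message _
  unfold Spec_is_crash_like_error is_crash_like_error is_crash_like_error_alt
  rw [← pv_main]
  simp only [pvMarkers, List.any_cons, List.any_nil]
  simp only [Bool.decide_eq_true, ← PySem.Chars.isIn_iff_infix, PySem.Str.isIn_eq]
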